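-- pv_equiv track=rewrite | github.com/DongjunLim/algorithm_study | DP/연속합.py | solution
-- ===== SOURCE A (Python) =====
-- def solution(n, a):
--     lis = [[0] * 2 for _ in range(n)]
--     lis[0][0] = a[0]
--     lis[0][1] = a[0]
--     answer = a[0]
--     for i in range(1, n):
--         lis[i][0] = max(a[i], lis[i-1][0] + a[i])
--         lis[i][1] = max(lis[i-1][0], lis[i-1][1] + a[i])
--         answer = max(answer, max(lis[i]))
--
--     return answer
-- ===== SOURCE B (Python) =====
-- def solution(n, a):
--     t = [a[i] for i in range(n)]
--     L = []
--     cur = 0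
--     for x in t:
--         cur = max(x, cur + x)
--         L.append(cur)
--     R = []
--     cur = 0
--     for x in reversed(t):
--         cur = max(x, cur + x)
--         R.append(cur)
--     R.reverse()
--     ans = max(L)
--     for left, right in zip(L, R[2:] + [0]):
--         ans = max(ans, left + max(0, right))
--     return ans
-- ===== Notes on version B (the rewrite author's own statement) =====
-- stated objective: alternative
-- what changed: Replaces the single forward DP with a skip-state (lis[i][1]) by two independent Kadane passes (max subarray ending at i, max subarray starting at i) combined per skip position via zip; Pre_ excludes n<1 and n>len(a), where A raises IndexError.
import Mathlib
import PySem

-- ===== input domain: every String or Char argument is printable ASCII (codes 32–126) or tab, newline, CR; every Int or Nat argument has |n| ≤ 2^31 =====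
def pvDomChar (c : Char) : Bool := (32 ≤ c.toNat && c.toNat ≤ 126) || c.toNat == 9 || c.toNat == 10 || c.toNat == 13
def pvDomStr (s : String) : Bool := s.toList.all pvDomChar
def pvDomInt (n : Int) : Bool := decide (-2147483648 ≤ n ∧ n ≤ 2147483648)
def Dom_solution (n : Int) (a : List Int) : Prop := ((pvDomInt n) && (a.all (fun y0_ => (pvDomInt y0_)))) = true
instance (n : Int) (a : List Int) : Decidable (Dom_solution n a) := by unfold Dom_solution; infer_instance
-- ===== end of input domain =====

-- B replaces A's single forward DP with a skip-state by two independent Kadane passes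
-- (best sum ending at i, best sum starting at i) combined per skip position (objective: alternative).

-- ===== PORT A =====
-- the loop body of A's 'for i in range(1, n)' (reads a[i] and lis[i-1], writes lis[i], updates answer)
def stepA (a : List Int) (st : List (Int × Int) × Int) (i : Int) : List (Int × Int) × Int :=
  let ai := (PySem.List.pyGet? a i).getD 0
  let prev := (PySem.List.pyGet? st.1 (i - 1)).getD (0, 0)
  let cur0 := max ai (prev.1 + ai)                                -- lis[i][0] = max(a[i], lis[i-1][0] + a[i])
  let cur1 := max prev.1 (prev.2 + ai)                            -- lis[i][1] = max(lis[i-1][0], lis[i-1][1] + a[i])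
  (PySem.List.pySetD st.1 i (cur0, cur1), max st.2 (max cur0 cur1))

def solution (n : Int) (a : List Int) : Int :=
  let lis0 : List (Int × Int) := (PySem.List.pyRange 0 n 1).map (fun _ => (0, 0))  -- [[0]*2 for _ in range(n)]
  let a0 : Int := (PySem.List.pyGet? a 0).getD 0                                   -- a[0]
  let lis1 := PySem.List.pySetD lis0 0 (a0, a0)                                    -- lis[0][0] = lis[0][1] = a[0]
  let st := (PySem.List.pyRange 1 n 1).foldl (stepA a) (lis1, a0)
  st.2

-- ===== PORT B =====
-- Kadane loop body, shared verbatim by B's forward and backward passes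
def stepK (st : List Int × Int) (x : Int) : List Int × Int :=
  (st.1 ++ [max x (st.2 + x)], max x (st.2 + x))                  -- cur = max(x, cur + x); acc.append(cur)

def solution_alt (n : Int) (a : List Int) : Int :=
  let t := (PySem.List.pyRange 0 n 1).map (fun i => (PySem.List.pyGet? a i).getD 0)  -- t = [a[i] for i in range(n)]
  let L := (t.foldl stepK ([], 0)).1
  let R := (t.reverse.foldl stepK ([], 0)).1.reverse              -- backward pass over reversed(t), then R.reverse()
  let ans0 := (PySem.List.max? L (fun y => y)).getD 0             -- ans = max(L)
  (L.zip (PySem.List.slice R (some 2) none ++ [0])).foldl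
    (fun ans p => max ans (p.1 + max 0 p.2)) ans0                 -- for left, right in zip(L, R[2:] + [0])

-- ===== PRECONDITION & SPEC =====
-- A raises IndexError when n < 1 (lis[0]) or n > len(a) (a[i]); exactly those inputs are excluded.
def Pre_solution (n : Int) (a : List Int) : Prop := 1 ≤ n ∧ n ≤ (a.length : Int)
instance (n : Int) (a : List Int) : Decidable (Pre_solution n a) := by unfold Pre_solution; infer_instance
def pvWitness_solution : Int × List Int := (3, [2, -4, 3])

def Spec_solution (n : Int) (a : List Int) (out : Int) : Prop := out = solution_alt n a
instance (n : Int) (a : List Int) (out : Int) : Decidable (Spec_solution n a out) := by unfold Spec_solution; infer_instance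

-- ===== CLAIM (what is proved, stated in full; the proofs are below) =====
def Claim_equal_solution : Prop := ∀ (n : Int) (a : List Int), Dom_solution n a → Pre_solution n a → Spec_solution n a (solution n a)

-- ===== LEMMAS AND PROOFS =====

-- v is the maximum of the set P of candidate sums
def PVMax (P : Int → Prop) (v : Int) : Prop := P v ∧ ∀ w, P w → w ≤ v

-- candidate sets: sums of contiguous runs of p, possibly with one element skipped
def EndC (p : List Int) (v : Int) : Prop := ∃ q m, p = q ++ m ∧ m ≠ [] ∧ v = m.sum
def SkE (p : List Int) (v : Int) : Prop := ∃ q m y z, p = q ++ m ++ y :: z ∧ m ≠ [] ∧ v = m.sum + z.sum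
def SkS (p : List Int) (v : Int) : Prop := v = p.sum ∨ SkE p v
def BegC (u : List Int) (v : Int) : Prop := ∃ m s, u = m ++ s ∧ m ≠ [] ∧ v = m.sum
def NSC (t : List Int) (v : Int) : Prop := ∃ q m s, t = q ++ (m ++ s) ∧ m ≠ [] ∧ v = m.sum
def SKC (t : List Int) (v : Int) : Prop := ∃ q m y z s, t = q ++ m ++ y :: (z ++ s) ∧ m ≠ [] ∧ v = m.sum + z.sum
def Cand (t : List Int) (v : Int) : Prop := NSC t v ∨ SKC t v

lemma isMax_single (x : Int) : PVMax (fun v => v = x) x := by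
  exact ⟨rfl, fun w hw => le_of_eq hw⟩

lemma isMax_union {P Q : Int → Prop} {a b : Int} (hP : PVMax P a) (hQ : PVMax Q b) :
    PVMax (fun v => P v ∨ Q v) (max a b) := by
  constructor
  · rcases max_choice a b with h | h <;> rw [h]
    · exact Or.inl hP.1
    · exact Or.inr hQ.1
  · rintro w (hw | hw)
    · exact le_trans (hP.2 w hw) (le_max_left a b)
    · exact le_trans (hQ.2 w hw) (le_max_right a b)

lemma isMax_add {P : Int → Prop} {a : Int} (x : Int) (hP : PVMax P a) :
    PVMax (fun v => ∃ w, P w ∧ v = w + x) (a + x) := by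
  refine ⟨⟨a, hP.1, rfl⟩, ?_⟩
  rintro w ⟨u, hu, rfl⟩
  have := hP.2 u hu
  omega

lemma isMax_congr {P Q : Int → Prop} {a : Int} (h : ∀ v, P v ↔ Q v) (hP : PVMax P a) : PVMax Q a := by
  exact ⟨(h a).1 hP.1, fun w hw => hP.2 w ((h w).2 hw)⟩

lemma isMax_unique {P : Int → Prop} {a b : Int} (ha : PVMax P a) (hb : PVMax P b) : a = b :=
  le_antisymm (hb.2 a ha.1) (ha.2 b hb.1)

lemma snoc_eq_append {l u v : List Int} {x : Int} (h : l ++ [x] = u ++ v) :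
    (v = [] ∧ u = l ++ [x]) ∨ ∃ v', v = v' ++ [x] ∧ l = u ++ v' := by
  rcases v.eq_nil_or_concat with rfl | ⟨v', y, rfl⟩
  · exact Or.inl ⟨rfl, by simpa using h.symm⟩
  · simp only [List.concat_eq_append] at h ⊢
    rw [← List.append_assoc] at h
    obtain ⟨h1, h2⟩ := List.append_inj' h rfl
    obtain rfl : x = y := by simpa using h2
    exact Or.inr ⟨v', rfl, h1⟩

lemma endC_singleton (x : Int) : ∀ v, EndC [x] v ↔ v = x := by
  intro v
  constructor
  · rintro ⟨q, m, h, hm, rfl⟩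
    cases q with
    | nil =>
      simp only [List.nil_append] at h
      rw [← h]; simp
    | cons c q' =>
      simp only [List.cons_append, List.cons.injEq] at h
      exact absurd (List.append_eq_nil_iff.mp h.2.symm).2 hm
  · rintro rfl
    exact ⟨[], [v], rfl, by simp, by simp⟩

lemma skS_singleton (x : Int) : ∀ v, SkS [x] v ↔ v = x := by
  intro v
  constructor
  · rintro (rfl | ⟨q, m, y, z, h, hm, rfl⟩)
    · simp
    · exfalso
      have hl := congrArg List.length h
      have hm' : 0 < m.length := List.length_pos_of_ne_nil hm
      simp at hl
      omega
  · rintro rfl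
    exact Or.inl (by simp)

lemma cand_singleton (x : Int) : ∀ v, Cand [x] v ↔ v = x := by
  intro v
  constructor
  · rintro (⟨q, m, s, h, hm, rfl⟩ | ⟨q, m, y, z, s, h, hm, rfl⟩)
    · have hl := congrArg List.length h
      have hm' : 0 < m.length := List.length_pos_of_ne_nil hm
      simp at hl
      obtain rfl : q = [] := List.eq_nil_of_length_eq_zero (by omega)
      obtain rfl : s = [] := List.eq_nil_of_length_eq_zero (by omega)
      simp only [List.nil_append, List.append_nil] at h
      rw [← h]; simp
    · exfalso
      have hl := congrArg List.length h
      have hm' : 0 < m.length := List.length_pos_of_ne_nil hm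
      simp at hl
      omega
  · rintro rfl
    exact Or.inl ⟨[], [v], [], by simp, by simp, by simp⟩

lemma endC_snoc (p : List Int) (x : Int) :
    ∀ v, EndC (p ++ [x]) v ↔ (v = x ∨ ∃ w, EndC p w ∧ v = w + x) := by
  intro v
  constructor
  · rintro ⟨q, m, h, hm, rfl⟩
    rcases snoc_eq_append h with ⟨rfl, _⟩ | ⟨m', rfl, hp⟩
    · exact absurd rfl hm
    · cases m' with
      | nil => exact Or.inl (by simp)
      | cons c m'' =>
        exact Or.inr ⟨(c :: m'').sum, ⟨q, c :: m'', hp, by simp, rfl⟩, by simp; omega⟩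
  · rintro (rfl | ⟨w, ⟨q, m, hp, hm, rfl⟩, rfl⟩)
    · exact ⟨p, [v], rfl, by simp, by simp⟩
    · exact ⟨q, m ++ [x], by rw [hp, List.append_assoc], by simp, by simp⟩

lemma skS_snoc (p : List Int) (x : Int) :
    ∀ v, SkS (p ++ [x]) v ↔ (EndC p v ∨ ∃ w, SkS p w ∧ v = w + x) := by
  intro v
  constructor
  · rintro (rfl | ⟨q, m, y, z, h, hm, rfl⟩)
    · exact Or.inr ⟨p.sum, Or.inl rfl, by simp⟩
    · have h' : p ++ [x] = (q ++ m ++ [y]) ++ z := by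
        rw [h]; simp [List.append_assoc]
      rcases snoc_eq_append h' with ⟨rfl, h2⟩ | ⟨z', rfl, hp⟩
      · obtain ⟨h3, h4⟩ := List.append_inj' h2.symm rfl
        exact Or.inl ⟨q, m, h3, hm, by simp⟩
      · refine Or.inr ⟨m.sum + z'.sum, Or.inr ⟨q, m, y, z', ?_, hm, rfl⟩, by simp; ring⟩
        rw [hp]; simp [List.append_assoc]
  · rintro (⟨q, m, hp, hm, rfl⟩ | ⟨w, (rfl | ⟨q, m, y, z, hp, hm, rfl⟩), rfl⟩)
    · exact Or.inr ⟨q, m, x, [], by simp [hp], hm, by simp⟩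
    · exact Or.inl (by simp)
    · refine Or.inr ⟨q, m, y, z ++ [x], ?_, hm, by simp; ring⟩
      rw [hp]; simp

lemma cand_snoc (p : List Int) (x : Int) :
    ∀ v, Cand (p ++ [x]) v ↔ (Cand p v ∨ (EndC (p ++ [x]) v ∨ SkS (p ++ [x]) v)) := by
  intro v
  constructor
  · rintro (⟨q, m, s, h, hm, rfl⟩ | ⟨q, m, y, z, s, h, hm, rfl⟩)
    · have h' : p ++ [x] = (q ++ m) ++ s := by rw [h]; simp
      rcases snoc_eq_append h' with ⟨rfl, h2⟩ | ⟨s', rfl, hp⟩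
      · exact Or.inr (Or.inl ⟨q, m, h2.symm, hm, rfl⟩)
      · exact Or.inl (Or.inl ⟨q, m, s', by rw [hp]; simp, hm, rfl⟩)
    · have h' : p ++ [x] = (q ++ m ++ [y] ++ z) ++ s := by rw [h]; simp [List.append_assoc]
      rcases snoc_eq_append h' with ⟨rfl, h2⟩ | ⟨s', rfl, hp⟩
      · refine Or.inr (Or.inr (Or.inr ⟨q, m, y, z, ?_, hm, by simp⟩))
        rw [h2.symm]; simp [List.append_assoc]
      · refine Or.inl (Or.inr ⟨q, m, y, z, s', ?_, hm, rfl⟩)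
        rw [hp]; simp [List.append_assoc]
  · rintro ((⟨q, m, s, hp, hm, rfl⟩ | ⟨q, m, y, z, s, hp, hm, rfl⟩) | hE | hS)
    · exact Or.inl ⟨q, m, s ++ [x], by rw [hp]; simp, hm, rfl⟩
    · exact Or.inr ⟨q, m, y, z, s ++ [x], by rw [hp]; simp [List.append_assoc], hm, rfl⟩
    · obtain ⟨q, m, h, hm, rfl⟩ := hE
      exact Or.inl ⟨q, m, [], by rw [h]; simp, hm, rfl⟩
    · rcases hS with rfl | ⟨q, m, y, z, h, hm, rfl⟩
      · exact Or.inl ⟨[], p ++ [x], [], by simp, by simp, by simp⟩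
      · exact Or.inr ⟨q, m, y, z, [], by rw [h]; simp, hm, rfl⟩

lemma kadane_step {p : List Int} {l s ans : Int} (x : Int)
    (hl : PVMax (EndC p) l) (hs : PVMax (SkS p) s) (ha : PVMax (Cand p) ans) :
    PVMax (EndC (p ++ [x])) (max x (l + x)) ∧ PVMax (SkS (p ++ [x])) (max l (s + x)) ∧
    PVMax (Cand (p ++ [x])) (max ans (max (max x (l + x)) (max l (s + x)))) := by
  have e1 : PVMax (EndC (p ++ [x])) (max x (l + x)) :=
    isMax_congr (fun v => (endC_snoc p x v).symm) (isMax_union (isMax_single x) (isMax_add x hl))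
  have e2 : PVMax (SkS (p ++ [x])) (max l (s + x)) :=
    isMax_congr (fun v => (skS_snoc p x v).symm) (isMax_union hl (isMax_add x hs))
  exact ⟨e1, e2, isMax_congr (fun v => (cand_snoc p x v).symm) (isMax_union ha (isMax_union e1 e2))⟩

lemma endC_take_cand {t : List Int} {j : Nat} {v : Int} (h : EndC (t.take j) v) : Cand t v := by
  obtain ⟨q, m, h, hm, rfl⟩ := h
  have hsplit := List.take_append_drop j t
  rw [h] at hsplit
  refine Or.inl ⟨q, m, t.drop j, ?_, hm, rfl⟩
  rw [← List.append_assoc]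
  exact hsplit.symm

lemma endC_reverse (u : List Int) : ∀ v, EndC u.reverse v ↔ BegC u v := by
  intro v
  constructor
  · rintro ⟨q, m, h, hm, rfl⟩
    refine ⟨m.reverse, q.reverse, ?_, by simpa using hm, by simp⟩
    rw [← List.reverse_reverse u, h, List.reverse_append]
  · rintro ⟨m, s, h, hm, rfl⟩
    refine ⟨s.reverse, m.reverse, ?_, by simpa using hm, by simp⟩
    rw [h, List.reverse_append]

-- ============ A side ============

lemma A_loop (a : List Int) (n : Int) (hn : n ≤ (a.length : Int)) :
    ∀ (k : Nat) (i : Int), 1 ≤ i → i ≤ n → (n - i).toNat = k →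
    ∀ (lis : List (Int × Int)) (answer l s : Int),
      lis.length = n.toNat →
      PySem.List.pyGet? lis (i - 1) = some (l, s) →
      PVMax (EndC ((a.take n.toNat).take i.toNat)) l →
      PVMax (SkS ((a.take n.toNat).take i.toNat)) s →
      PVMax (Cand ((a.take n.toNat).take i.toNat)) answer →
      PVMax (Cand (a.take n.toNat)) (((PySem.List.pyRange i n 1).foldl (stepA a) (lis, answer)).2) := by
  intro k
  induction k with
  | zero =>
    intro i h1 h2 h0 lis answer l s hlen hget hL hS hA
    rw [PySem.List.pyRange_one_eq_nil (by omega : n ≤ i)]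
    simp only [List.foldl_nil]
    have ht : List.take i.toNat (List.take n.toNat a) = List.take n.toNat a := by
      rw [show i.toNat = n.toNat from by omega]
      simp
    rwa [ht] at hA
  | succ k ih =>
    intro i h1 h2 h0 lis answer l s hlen hget hL hS hA
    have hi : i < n := by omega
    have hia : i.toNat < a.length := by omega
    have hain : i.toNat < n.toNat := by omega
    rw [PySem.List.pyRange_one_cons hi]
    simp only [List.foldl_cons]
    have hget_a : PySem.List.pyGet? a i = some a[i.toNat] := by
      rw [PySem.List.pyGet?_of_nonneg a (by omega : (0:Int) ≤ i)]
      exact List.getElem?_eq_getElem hia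
    have hstep : stepA a (lis, answer) i =
        (lis.set i.toNat (max a[i.toNat] (l + a[i.toNat]), max l (s + a[i.toNat])),
         max answer (max (max a[i.toNat] (l + a[i.toNat])) (max l (s + a[i.toNat])))) := by
      simp only [stepA, hget_a, hget, Option.getD_some]
      rw [PySem.List.pySetD_of_nonneg lis _ (by omega : (0:Int) ≤ i)]
    rw [hstep]
    have htke : List.take ((i + 1)).toNat (List.take n.toNat a) =
        List.take i.toNat (List.take n.toNat a) ++ [a[i.toNat]] := by
      have h1' : (i + 1).toNat = i.toNat + 1 := by omega
      have hsome : (List.take n.toNat a)[i.toNat]? = some a[i.toNat] := by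
        rw [List.getElem?_take_of_lt hain]
        exact List.getElem?_eq_getElem hia
      rw [h1', List.take_add_one, hsome]
      rfl
    obtain ⟨e1, e2, e3⟩ := kadane_step (p := List.take i.toNat (List.take n.toNat a))
      a[i.toNat] hL hS hA
    rw [← htke] at e1 e2 e3
    exact ih (i + 1) (by omega) (by omega) (by omega) _ _ _ _
      (by simpa using hlen)
      (by
        rw [show i + 1 - 1 = i from by ring,
          PySem.List.pyGet?_of_nonneg _ (by omega : (0:Int) ≤ i)]
        exact List.getElem?_set_self (by rw [hlen]; exact hain))
      e1 e2 e3

lemma solution_isMax (n : Int) (a : List Int) (h1 : 1 ≤ n) (h2 : n ≤ (a.length : Int)) :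
    PVMax (Cand (a.take n.toNat)) (solution n a) := by
  have h0 : (0:Nat) < a.length := by omega
  have hn0 : 0 < n.toNat := by omega
  have hget0 : PySem.List.pyGet? a 0 = some a[0] := by
    rw [PySem.List.pyGet?_zero]
    exact List.getElem?_eq_getElem h0
  have hrepr : solution n a = ((PySem.List.pyRange 1 n 1).foldl (stepA a)
      (PySem.List.pySetD ((PySem.List.pyRange 0 n 1).map (fun _ => ((0:Int), (0:Int)))) 0
        ((PySem.List.pyGet? a 0).getD 0, (PySem.List.pyGet? a 0).getD 0),
       (PySem.List.pyGet? a 0).getD 0)).2 := rfl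
  rw [hrepr, hget0]
  simp only [Option.getD_some]
  rw [PySem.List.pySetD_of_nonneg _ _ (le_refl (0:Int))]
  simp only [Int.toNat_zero]
  have hlen : (((PySem.List.pyRange 0 n 1).map (fun _ => ((0:Int), (0:Int)))).set 0
      (a[0], a[0])).length = n.toNat := by
    simp [PySem.List.length_pyRange_one]
  have htk1 : List.take (1:Int).toNat (List.take n.toNat a) = [a[0]] := by
    have hsome : (List.take n.toNat a)[0]? = some a[0] := by
      rw [List.getElem?_take_of_lt hn0]
      exact List.getElem?_eq_getElem h0
    rw [show ((1:Int)).toNat = 0 + 1 from rfl, List.take_add_one, hsome]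
    rfl
  refine A_loop a n h2 (n - 1).toNat 1 (le_refl 1) h1 rfl _ a[0] a[0] a[0] hlen ?_ ?_ ?_ ?_
  · rw [show (1:Int) - 1 = 0 from by ring, PySem.List.pyGet?_zero]
    exact List.getElem?_set_self (by rw [List.length_map, PySem.List.length_pyRange_one]; omega)
  · rw [htk1]
    exact isMax_congr (fun v => (endC_singleton a[0] v).symm) (isMax_single a[0])
  · rw [htk1]
    exact isMax_congr (fun v => (skS_singleton a[0] v).symm) (isMax_single a[0])
  · rw [htk1]
    exact isMax_congr (fun v => (cand_singleton a[0] v).symm) (isMax_single a[0])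

-- ============ B side ============

lemma K_loop : ∀ (r p : List Int) (Lacc : List Int) (cur : Int),
    Lacc.length = p.length →
    (∀ k (hk : k < Lacc.length), PVMax (EndC ((p ++ r).take (k + 1))) (Lacc[k])) →
    ((p = [] ∧ cur = 0) ∨ PVMax (EndC p) cur) →
    (r.foldl stepK (Lacc, cur)).1.length = (p ++ r).length ∧
    ∀ k (hk : k < (r.foldl stepK (Lacc, cur)).1.length),
      PVMax (EndC ((p ++ r).take (k + 1))) ((r.foldl stepK (Lacc, cur)).1[k]) := by
  intro r
  induction r with
  | nil =>
    intro p Lacc cur hlen hidx _hcur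
    constructor
    · simpa using hlen
    · intro k hk; exact hidx k hk
  | cons x r' ih =>
    intro p Lacc cur hlen hidx hcur
    simp only [List.foldl_cons, stepK]
    have hnew : PVMax (EndC (p ++ [x])) (max x (cur + x)) := by
      rcases hcur with ⟨rfl, rfl⟩ | hM
      · have hx : max x ((0 : Int) + x) = x := by omega
        rw [hx, List.nil_append]
        exact isMax_congr (fun v => (endC_singleton x v).symm) (isMax_single x)
      · exact isMax_congr (fun v => (endC_snoc p x v).symm)
          (isMax_union (isMax_single x) (isMax_add x hM))
    have hres := ih (p ++ [x]) (Lacc ++ [max x (cur + x)]) (max x (cur + x))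
      (by simp [hlen])
      (by
        intro k hk
        rw [List.length_append, List.length_singleton] at hk
        rcases Nat.lt_or_ge k Lacc.length with hlt | hge
        · rw [List.getElem_append_left hlt]
          have := hidx k hlt
          rwa [List.append_assoc, List.singleton_append]
        · have hkeq : k = Lacc.length := by omega
          subst hkeq
          rw [List.getElem_concat_length rfl]
          have htk : List.take (Lacc.length + 1) (p ++ [x] ++ r') = p ++ [x] := by
            rw [hlen, show p.length + 1 = (p ++ [x]).length from by simp]
            exact List.take_left
          rw [htk]
          exact hnew)
      (Or.inr hnew)
    rwa [List.append_assoc, List.singleton_append] at hres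

lemma L_spec (t : List Int) :
    (t.foldl stepK ([], 0)).1.length = t.length ∧
    ∀ k (hk : k < (t.foldl stepK ([], 0)).1.length),
      PVMax (EndC (t.take (k + 1))) ((t.foldl stepK ([], 0)).1[k]) := by
  have h := K_loop t [] [] 0 rfl (by intro k hk; simp at hk) (Or.inl ⟨rfl, rfl⟩)
  simpa using h

lemma R_spec (t : List Int) :
    (t.reverse.foldl stepK ([], 0)).1.reverse.length = t.length ∧
    ∀ k (hk : k < (t.reverse.foldl stepK ([], 0)).1.reverse.length),
      PVMax (BegC (t.drop k)) ((t.reverse.foldl stepK ([], 0)).1.reverse[k]) := by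
  obtain ⟨hlen, hidx⟩ := L_spec t.reverse
  constructor
  · simpa using hlen
  · intro k hk
    rw [List.length_reverse, hlen, List.length_reverse] at hk
    have hk' : (t.reverse.foldl stepK ([], 0)).1.length - 1 - k < (t.reverse.foldl stepK ([], 0)).1.length := by
      rw [hlen, List.length_reverse]; omega
    rw [List.getElem_reverse]
    have hmain := hidx ((t.reverse.foldl stepK ([], 0)).1.length - 1 - k) hk'
    have hidxeq : (t.reverse.foldl stepK ([], 0)).1.length - 1 - k + 1 = t.length - k := by
      rw [hlen, List.length_reverse]; omega
    rw [hidxeq] at hmain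
    have htk : t.reverse.take (t.length - k) = (t.drop k).reverse := by
      rw [List.take_reverse, show t.length - (t.length - k) = k from by omega]
    rw [htk] at hmain
    exact isMax_congr (endC_reverse (t.drop k)) hmain

lemma foldl_max_proj {α : Type} (f : α → Int) (l : List α) (a : Int) :
    l.foldl (fun acc x => max acc (f x)) a = a ∨
    ∃ x ∈ l, l.foldl (fun acc x => max acc (f x)) a = f x := by
  induction l generalizing a with
  | nil => exact Or.inl rfl
  | cons x l ih =>
    simp only [List.foldl_cons]
    rcases ih (max a (f x)) with hc | ⟨y, hy, hc⟩
    · rw [hc]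
      rcases max_choice a (f x) with h | h
      · exact Or.inl h
      · exact Or.inr ⟨x, List.mem_cons_self, h⟩
    · exact Or.inr ⟨y, List.mem_cons_of_mem x hy, hc⟩

lemma B_assemble (t L R : List Int) (m0 : Int)
    (htne : 0 < t.length)
    (hLlen : L.length = t.length)
    (hLidx : ∀ k (hk : k < L.length), PVMax (EndC (t.take (k + 1))) L[k])
    (hRlen : R.length = t.length)
    (hRidx : ∀ k (hk : k < R.length), PVMax (BegC (t.drop k)) R[k])
    (hm0mem : m0 ∈ L)
    (hm0ub : ∀ y ∈ L, y ≤ m0) :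
    PVMax (Cand t) ((L.zip (R.drop 2 ++ [0])).foldl (fun ans p => max ans (p.1 + max 0 p.2)) m0) := by
  have hub := PySem.List.le_foldl_max_int (L.zip (R.drop 2 ++ [0])) (fun p => p.1 + max 0 p.2) m0
  have hrhslen : (R.drop 2 ++ [0]).length = (t.length - 2) + 1 := by
    simp [hRlen]
  constructor
  · -- the fold's value is itself a candidate sum
    rcases foldl_max_proj (fun p : Int × Int => p.1 + max 0 p.2) (L.zip (R.drop 2 ++ [0])) m0 with
      hc | ⟨pr, hmem, hc⟩
    · rw [hc]
      obtain ⟨i, hi, hieq⟩ := List.getElem_of_mem hm0mem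
      rw [← hieq]
      exact endC_take_cand (hLidx i hi).1
    · obtain ⟨k, hk, hkeq⟩ := List.getElem_of_mem hmem
      rw [hc, ← hkeq, List.getElem_zip]
      simp only
      have hkL : k < L.length := by
        rw [List.length_zip] at hk; omega
      have hkr : k < (R.drop 2 ++ [0]).length := by
        rw [List.length_zip] at hk; omega
      by_cases hsm : k < R.length - 2
      · have hk2 : k + 2 < R.length := by omega
        have hdl : k < (R.drop 2).length := by simp; omega
        have hrk : (R.drop 2 ++ [0])[k] = R[k + 2] := by
          rw [List.getElem_append_left hdl]
          simp only [List.getElem_drop]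
          simp only [show 2 + k = k + 2 from by omega]
        by_cases hneg : R[k + 2] ≤ 0
        · rw [hrk, max_eq_left hneg, add_zero]
          exact endC_take_cand (hLidx k hkL).1
        · rw [hrk, max_eq_right (le_of_not_ge hneg)]
          obtain ⟨⟨q, m, hqm, hm, hLval⟩, -⟩ := hLidx k hkL
          obtain ⟨⟨m', s', hms, hm', hRval⟩, -⟩ := hRidx (k + 2) hk2
          right
          refine ⟨q, m, t[k + 1], m', s', ?_, hm, by rw [hLval, hRval]⟩
          have hsplit1 : t.take (k + 1) ++ t.drop (k + 1) = t := List.take_append_drop _ _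
          have hsplit2 : t.drop (k + 1) = t[k + 1] :: t.drop (k + 2) :=
            List.drop_eq_getElem_cons (by omega)
          conv_lhs => rw [← hsplit1, hsplit2, hqm, hms]
      · have hge : (R.drop 2).length ≤ k := by simp; omega
        have hrk : (R.drop 2 ++ [0])[k] = 0 := by
          rw [List.getElem_append_right hge]
          simp
        rw [hrk]
        norm_num
        exact endC_take_cand (hLidx k hkL).1
  · -- every candidate sum is bounded by the fold's value
    intro v hv
    rcases hv with ⟨q, m, s, hqms, hm, rfl⟩ | ⟨q, m, y, z, s, hdec, hm, rfl⟩
    · have hmpos : 0 < m.length := List.length_pos_of_ne_nil hm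
      have hql : q.length + m.length ≤ t.length := by
        have := congrArg List.length hqms; simp at this; omega
      have htake : t.take (q.length + m.length) = q ++ m := by
        have hrw : t = (q ++ m) ++ s := by rw [hqms, List.append_assoc]
        rw [hrw, List.take_left' (by simp)]
      have hkL : q.length + m.length - 1 < L.length := by rw [hLlen]; omega
      have hle1 : m.sum ≤ L[q.length + m.length - 1] := by
        refine (hLidx _ hkL).2 m.sum ⟨q, m, ?_, hm, rfl⟩
        rw [show q.length + m.length - 1 + 1 = q.length + m.length from by omega]
        exact htake
      have hle2 : L[q.length + m.length - 1] ≤ m0 := hm0ub _ (List.getElem_mem _)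
      exact le_trans (le_trans hle1 hle2) hub.1
    · have hmpos : 0 < m.length := List.length_pos_of_ne_nil hm
      have hlen_eq : t.length = q.length + m.length + 1 + z.length + s.length := by
        have := congrArg List.length hdec; simp at this; omega
      have htake : t.take (q.length + m.length) = q ++ m := by
        have hrw : t = (q ++ m) ++ (y :: (z ++ s)) := by rw [hdec]
        rw [hrw, List.take_left' (by simp)]
      have hkL : q.length + m.length - 1 < L.length := by rw [hLlen]; omega
      have hkzip : q.length + m.length - 1 < (L.zip (R.drop 2 ++ [0])).length := by
        rw [List.length_zip, hLlen, hrhslen]; omega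
      have hidx : q.length + m.length - 1 < (R.drop 2 ++ [0]).length := by
        rw [hrhslen]; omega
      have hfx := hub.2 ((L.zip (R.drop 2 ++ [0]))[q.length + m.length - 1]) (List.getElem_mem hkzip)
      rw [List.getElem_zip] at hfx
      simp only at hfx
      have hle1 : m.sum ≤ L[q.length + m.length - 1] := by
        refine (hLidx _ hkL).2 m.sum ⟨q, m, ?_, hm, rfl⟩
        rw [show q.length + m.length - 1 + 1 = q.length + m.length from by omega]
        exact htake
      have hle2 : z.sum ≤ max (0:Int) ((R.drop 2 ++ [0])[q.length + m.length - 1]'hidx) := by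
        cases z with
        | nil => simp
        | cons z0 zt =>
          simp only [List.length_cons] at hlen_eq
          have hsm : q.length + m.length - 1 < (R.drop 2).length := by
            simp [hRlen]; omega
          have hj1 : q.length + m.length + 1 < R.length := by rw [hRlen]; omega
          have hrk : (R.drop 2 ++ [0])[q.length + m.length - 1]'hidx = R[q.length + m.length + 1] := by
            rw [List.getElem_append_left hsm]
            simp only [List.getElem_drop]
            simp only [show 2 + (q.length + m.length - 1) = q.length + m.length + 1 from by omega]
          have hdrop : t.drop (q.length + m.length + 1) = (z0 :: zt) ++ s := by
            have hrw : t = (q ++ m ++ [y]) ++ ((z0 :: zt) ++ s) := by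
              rw [hdec]; simp [List.append_assoc]
            rw [hrw, List.drop_left' (by simp; omega)]
          have hbound : (z0 :: zt).sum ≤ R[q.length + m.length + 1] :=
            (hRidx _ hj1).2 (z0 :: zt).sum ⟨z0 :: zt, s, hdrop, by simp, rfl⟩
          rw [hrk]
          exact le_trans hbound (le_max_right 0 _)
      exact le_trans (add_le_add hle1 hle2) hfx

lemma comp_take (a : List Int) (n : Int) (h2 : n ≤ (a.length : Int)) :
    (PySem.List.pyRange 0 n 1).map (fun i => (PySem.List.pyGet? a i).getD 0) = a.take n.toNat := by
  apply List.ext_getElem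
  · simp [PySem.List.length_pyRange_one]
    omega
  · intro k hk hk'
    have hkn : k < n.toNat := by
      simpa [PySem.List.length_pyRange_one] using hk
    have hka : k < a.length := by omega
    simp only [List.getElem_map, PySem.List.getElem_pyRange_one, zero_add,
      PySem.List.pyGet?_natCast, List.getElem?_eq_getElem hka, Option.getD_some,
      List.getElem_take]

lemma solution_alt_isMax (n : Int) (a : List Int) (h1 : 1 ≤ n) (h2 : n ≤ (a.length : Int)) :
    PVMax (Cand (a.take n.toNat)) (solution_alt n a) := by
  have hlen_t : (a.take n.toNat).length = n.toNat := by
    rw [List.length_take]; omega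
  have htne : 0 < (a.take n.toNat).length := by omega
  have hslice : (PySem.List.pyRange 0 n 1).map (fun i => (PySem.List.pyGet? a i).getD 0)
      = a.take n.toNat := comp_take a n h2
  obtain ⟨hLlen, hLidx⟩ := L_spec (a.take n.toNat)
  obtain ⟨hRlen, hRidx⟩ := R_spec (a.take n.toNat)
  have hLne : ((a.take n.toNat).foldl stepK ([], 0)).1 ≠ [] := by
    intro hnil
    rw [hnil] at hLlen
    simp at hLlen
    omega
  obtain ⟨m0, hm0⟩ : ∃ m0, PySem.List.max? ((a.take n.toNat).foldl stepK ([], 0)).1 (fun y => y) = some m0 := by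
    cases hmx : PySem.List.max? ((a.take n.toNat).foldl stepK ([], 0)).1 (fun y => y) with
    | none => exact absurd ((PySem.List.max?_eq_none_iff _ _).mp hmx) hLne
    | some m => exact ⟨m, rfl⟩
  have hslice2 : PySem.List.slice ((a.take n.toNat).reverse.foldl stepK ([], 0)).1.reverse (some 2) none
      = ((a.take n.toNat).reverse.foldl stepK ([], 0)).1.reverse.drop 2 := by
    rw [PySem.List.slice_from _ (by norm_num : (0:Int) ≤ 2)]
    rfl
  have hrepr : solution_alt n a = ((((a.take n.toNat).foldl stepK ([], 0)).1.zip
      ((((a.take n.toNat).reverse.foldl stepK ([], 0)).1.reverse.drop 2) ++ [0])).foldl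
      (fun ans p => max ans (p.1 + max 0 p.2)) m0) := by
    show (((((PySem.List.pyRange 0 n 1).map (fun i => (PySem.List.pyGet? a i).getD 0)).foldl stepK ([], 0)).1.zip
      (PySem.List.slice (((PySem.List.pyRange 0 n 1).map (fun i => (PySem.List.pyGet? a i).getD 0)).reverse.foldl stepK ([], 0)).1.reverse
        (some 2) none ++ [0])).foldl
      (fun ans p => max ans (p.1 + max 0 p.2))
      ((PySem.List.max? (((PySem.List.pyRange 0 n 1).map (fun i => (PySem.List.pyGet? a i).getD 0)).foldl stepK ([], 0)).1 (fun y => y)).getD 0)) = _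
    rw [hslice, hslice2, hm0]
    rfl
  rw [hrepr]
  exact B_assemble (a.take n.toNat) _ _ m0 htne hLlen hLidx hRlen hRidx
    (PySem.List.max?_mem hm0) (PySem.List.max?_isMax hm0)

-- ===== VERDICT (by name: the statement is the Claim_ definition above) =====
theorem solution_spec : Claim_equal_solution := by
  intro n a _hdom hpre
  unfold Spec_solution
  exact isMax_unique (solution_isMax n a hpre.1 hpre.2) (solution_alt_isMax n a hpre.1 hpre.2)
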